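-- pv_equiv track=rewrite | github.com/kuko798/appli.io | python_classifier/rules.py | _smart_title_role
-- ===== SOURCE A (Python) =====
-- def _title_case(s: str) -> str:
--     small = {"and", "or", "of", "the", "a", "an", "in", "on", "at", "to", "for"}
--     parts = s.split()
--     out = []
--     for i, w in enumerate(parts):
--         lw = w.lower()
--         if i == 0 or lw not in small:
--             out.append(w[:1].upper() + w[1:].lower() if w else w)
--         else:
--             out.append(lw)
--     return " ".join(out)
--
-- _ROLE_ACRONYM_FIXES = {
--     "ai": "AI",
--     "ml": "ML",
--     "ui": "UI",
--     "ux": "UX",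
--     "api": "API",
--     "it": "IT",
--     "hr": "HR",
--     "sde": "SDE",
--     "nlp": "NLP",
--     "apx": "APX",
--     "hpe": "HPE",
-- }
--
-- def _smart_title_role(s: str) -> str:
--     """Title-case role strings but keep common tech acronyms uppercase."""
--     t = _title_case(s)
--     parts = t.split()
--     fixed = []
--     for w in parts:
--         lw = w.lower()
--         if lw in _ROLE_ACRONYM_FIXES:
--             fixed.append(_ROLE_ACRONYM_FIXES[lw])
--         else:
--             fixed.append(w)
--     return " ".join(fixed)
-- ===== SOURCE B (Python) =====
-- _SMALL = {"and", "or", "of", "the", "a", "an", "in", "on", "at", "to", "for"}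
--
-- _ACRONYMS = {
--     "ai": "AI", "ml": "ML", "ui": "UI", "ux": "UX", "api": "API",
--     "it": "IT", "hr": "HR", "sde": "SDE", "nlp": "NLP", "apx": "APX", "hpe": "HPE",
-- }
--
-- def _smart_title_role(s: str) -> str:
--     """Title-case role strings but keep common tech acronyms uppercase.
--
--     Single pass: one split, one indexed loop deciding acronym / capitalized /
--     small-word per word; no intermediate title-cased string and no re-split.
--     """
--     words = []
--     for i, w in enumerate(s.split()):
--         lw = w.lower()
--         if lw in _ACRONYMS:
--             words.append(_ACRONYMS[lw])
--         elif i == 0 or lw not in _SMALL: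
--             words.append(w[:1].upper() + w[1:].lower())
--         else:
--             words.append(lw)
--     return " ".join(words)
-- ===== Notes on version B (the rewrite author's own statement) =====
-- stated objective: simpler
-- what changed: Fuses A's two passes (title-case then join, re-split, acronym-fix, re-join) into one split and one indexed loop that decides acronym/capitalize/small-word per word, dropping the intermediate string and the second split/join.
import Mathlib
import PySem

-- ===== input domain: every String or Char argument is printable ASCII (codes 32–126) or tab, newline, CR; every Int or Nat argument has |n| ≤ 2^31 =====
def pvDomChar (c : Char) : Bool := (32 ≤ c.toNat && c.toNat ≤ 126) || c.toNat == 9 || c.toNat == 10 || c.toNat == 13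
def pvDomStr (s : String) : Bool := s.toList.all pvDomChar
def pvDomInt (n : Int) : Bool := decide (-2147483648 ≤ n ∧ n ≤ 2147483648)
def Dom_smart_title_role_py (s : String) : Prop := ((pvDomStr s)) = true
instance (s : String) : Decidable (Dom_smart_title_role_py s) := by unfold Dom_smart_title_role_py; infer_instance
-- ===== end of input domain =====

-- B fuses A's two passes (title-case, join, re-split, acronym-fix) into one split and one indexed loop; return values proved equal.


-- ===== PORT A =====
-- the module constants: the 'small' set literal and _ROLE_ACRONYM_FIXES dict literal
def pvSmall : PySem.Set (List Char) :=
  PySem.Set.ofList (["and", "or", "of", "the", "a", "an", "in", "on", "at", "to", "for"].map String.toList)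

def pvAcr : PySem.Dict (List Char) (List Char) :=
  PySem.Dict.ofList ([("ai", "AI"), ("ml", "ML"), ("ui", "UI"), ("ux", "UX"), ("api", "API"),
    ("it", "IT"), ("hr", "HR"), ("sde", "SDE"), ("nlp", "NLP"), ("apx", "APX"),
    ("hpe", "HPE")].map (fun p => (p.1.toList, p.2.toList)))

-- _title_case, on the char-list side (PySem.Str.* are thin wrappers over these)
def pvTitleCase (cs : List Char) : List Char :=
  let parts := PySem.Chars.split₀ cs
  let out := (PySem.List.enumerate parts 0).foldl
    (fun out iw =>
      let lw := PySem.Chars.lower iw.2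
      if iw.1 == 0 || !(pvSmall.contains lw) then
        out ++ [if !iw.2.isEmpty then
                  PySem.Chars.upper (PySem.Chars.slice iw.2 none (some 1)) ++
                    PySem.Chars.lower (PySem.Chars.slice iw.2 (some 1) none)
                else iw.2]
      else out ++ [lw]) []
  PySem.Chars.join [' '] out

def smart_title_role_py (s : String) : String :=
  let t := pvTitleCase s.toList
  let parts := PySem.Chars.split₀ t
  let fixed := parts.foldl
    (fun fixed w =>
      let lw := PySem.Chars.lower w
      if pvAcr.contains lw then fixed ++ [pvAcr.getD lw []] else fixed ++ [w]) []
  String.ofList (PySem.Chars.join [' '] fixed)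

-- ===== PORT B =====
def smart_title_role_py_alt (s : String) : String :=
  let words := (PySem.List.enumerate (PySem.Chars.split₀ s.toList) 0).foldl
    (fun ws iw =>
      let lw := PySem.Chars.lower iw.2
      if pvAcr.contains lw then ws ++ [pvAcr.getD lw []]
      else if iw.1 == 0 || !(pvSmall.contains lw) then
        ws ++ [PySem.Chars.upper (PySem.Chars.slice iw.2 none (some 1)) ++
                 PySem.Chars.lower (PySem.Chars.slice iw.2 (some 1) none)]
      else ws ++ [lw]) []
  String.ofList (PySem.Chars.join [' '] words)

-- ===== PRECONDITION & SPEC =====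
def Spec_smart_title_role_py (s : String) (out : String) : Prop := out = smart_title_role_py_alt s
instance (s : String) (out : String) : Decidable (Spec_smart_title_role_py s out) := by unfold Spec_smart_title_role_py; infer_instance

-- ===== CLAIM (what is proved, stated in full; the proofs are below) =====
def Claim_equal_smart_title_role_py : Prop := ∀ (s : String), Dom_smart_title_role_py s → Spec_smart_title_role_py s (smart_title_role_py s)

-- ===== LEMMAS AND PROOFS =====

-- Char ≤ is definitionally toNat ≤
theorem pv_char_le_toNat {a c : Char} (h : a ≤ c) : a.toNat ≤ c.toNat := h
theorem pv_char_le_of_toNat_le {a c : Char} (h : a.toNat ≤ c.toNat) : a ≤ c := h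

theorem pv_lowerChar_lowerChar (c : Char) :
    PySem.Chars.lowerChar (PySem.Chars.lowerChar c) = PySem.Chars.lowerChar c := by
  unfold PySem.Chars.lowerChar PySem.Chars.isupper
  by_cases h : 'A' ≤ c ∧ c ≤ 'Z'
  · have h65 : ('A').toNat ≤ c.toNat := pv_char_le_toNat h.1
    have h90 : c.toNat ≤ ('Z').toNat := pv_char_le_toNat h.2
    have hZ : ('Z').toNat = 90 := by decide
    have hA65 : ('A').toNat = 65 := by decide
    have hv : (Char.ofNat (c.toNat + 32)).toNat = c.toNat + 32 := by
      rw [Char.toNat_ofNat, if_pos]; exact Or.inl (by omega)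
    have hA : ¬ ('A' ≤ Char.ofNat (c.toNat + 32) ∧ Char.ofNat (c.toNat + 32) ≤ 'Z') := by
      rintro ⟨_, h2⟩
      have h3 := pv_char_le_toNat h2
      omega
    simp [h, hA]
  · simp [h]

theorem pv_lowerChar_upperChar (c : Char) :
    PySem.Chars.lowerChar (PySem.Chars.upperChar c) = PySem.Chars.lowerChar c := by
  unfold PySem.Chars.lowerChar PySem.Chars.upperChar PySem.Chars.isupper PySem.Chars.islower
  have hZ : ('Z').toNat = 90 := by decide
  have hA65 : ('A').toNat = 65 := by decide
  have ha : ('a').toNat = 97 := by decide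
  have hz : ('z').toNat = 122 := by decide
  by_cases h : 'a' ≤ c ∧ c ≤ 'z'
  · have h97 := pv_char_le_toNat h.1
    have h122 := pv_char_le_toNat h.2
    have hv : (Char.ofNat (c.toNat - 32)).toNat = c.toNat - 32 := by
      rw [Char.toNat_ofNat, if_pos]; exact Or.inl (by omega)
    have hup : 'A' ≤ Char.ofNat (c.toNat - 32) ∧ Char.ofNat (c.toNat - 32) ≤ 'Z' :=
      ⟨pv_char_le_of_toNat_le (by omega), pv_char_le_of_toNat_le (by omega)⟩
    have hveq : (Char.ofNat ((Char.ofNat (c.toNat - 32)).toNat + 32)) = c := by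
      rw [hv]
      have : c.toNat - 32 + 32 = c.toNat := by omega
      rw [this, Char.ofNat_toNat]
    have hnotup : ¬ ('A' ≤ c ∧ c ≤ 'Z') := by
      rintro ⟨_, h2⟩; have := pv_char_le_toNat h2; omega
    simp [h, hup, hveq, hnotup]
  · simp [h]

theorem pv_isspace_false_of_alpha (c : Char) (h65 : 65 ≤ c.toNat) (h122 : c.toNat ≤ 122) :
    PySem.Chars.isspace c = false := by
  unfold PySem.Chars.isspace
  simp only [Bool.or_eq_false_iff, Bool.and_eq_false_iff, decide_eq_false_iff_not]
  omega

theorem pv_isspace_lowerChar (c : Char) :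
    PySem.Chars.isspace (PySem.Chars.lowerChar c) = PySem.Chars.isspace c := by
  unfold PySem.Chars.lowerChar PySem.Chars.isupper
  by_cases h : 'A' ≤ c ∧ c ≤ 'Z'
  · have h65 : ('A').toNat ≤ c.toNat := pv_char_le_toNat h.1
    have h90 : c.toNat ≤ ('Z').toNat := pv_char_le_toNat h.2
    have hZ : ('Z').toNat = 90 := by decide
    have hA65 : ('A').toNat = 65 := by decide
    have hv : (Char.ofNat (c.toNat + 32)).toNat = c.toNat + 32 := by
      rw [Char.toNat_ofNat, if_pos]; exact Or.inl (by omega)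
    rw [if_pos (by simpa using h)]
    rw [pv_isspace_false_of_alpha _ (by omega) (by omega),
        pv_isspace_false_of_alpha _ (by omega) (by omega)]
  · rw [if_neg (by simpa using h)]

theorem pv_isspace_upperChar (c : Char) :
    PySem.Chars.isspace (PySem.Chars.upperChar c) = PySem.Chars.isspace c := by
  unfold PySem.Chars.upperChar PySem.Chars.islower
  by_cases h : 'a' ≤ c ∧ c ≤ 'z'
  · have h97 : ('a').toNat ≤ c.toNat := pv_char_le_toNat h.1
    have h122 : c.toNat ≤ ('z').toNat := pv_char_le_toNat h.2
    have hz : ('z').toNat = 122 := by decide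
    have ha : ('a').toNat = 97 := by decide
    have hv : (Char.ofNat (c.toNat - 32)).toNat = c.toNat - 32 := by
      rw [Char.toNat_ofNat, if_pos]; exact Or.inl (by omega)
    rw [if_pos (by simpa using h)]
    rw [pv_isspace_false_of_alpha _ (by omega) (by omega),
        pv_isspace_false_of_alpha _ (by omega) (by omega)]
  · rw [if_neg (by simpa using h)]

-- a "word": nonempty and whitespace-free
def pvWord (w : List Char) : Prop := w ≠ [] ∧ ∀ c ∈ w, PySem.Chars.isspace c = false

-- split₀ produces words
theorem pv_split₀_go_words (rest : List Char) (cur : List Char) (acc : List (List Char))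
    (hacc : ∀ w ∈ acc, pvWord w) (hcur : ∀ c ∈ cur, PySem.Chars.isspace c = false) :
    ∀ w ∈ PySem.Chars.split₀.go rest cur acc, pvWord w := by
  induction rest generalizing cur acc with
  | nil =>
    intro w hw
    by_cases hc : cur.isEmpty
    · simp only [PySem.Chars.split₀.go, hc, if_pos] at hw
      exact hacc w (by simpa using hw)
    · simp only [PySem.Chars.split₀.go, hc] at hw
      simp only [Bool.false_eq_true, if_false, List.mem_reverse, List.mem_cons] at hw
      rcases hw with h | h
      · subst h
        refine ⟨by simpa [List.isEmpty_iff] using hc, ?_⟩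
        intro c hc'; exact hcur c (List.mem_reverse.mp hc')
      · exact hacc w h
  | cons c rest ih =>
    intro w hw
    by_cases hs : PySem.Chars.isspace c
    · by_cases hc : cur.isEmpty
      · simp only [PySem.Chars.split₀.go, hs, hc, if_pos] at hw
        exact ih [] acc hacc (by simp) w hw
      · simp only [PySem.Chars.split₀.go, hs, hc, if_pos, Bool.false_eq_true, if_false] at hw
        refine ih [] (cur.reverse :: acc) ?_ (by simp) w hw
        intro u hu
        rcases List.mem_cons.mp hu with h | h
        · subst h
          exact ⟨by simpa [List.isEmpty_iff] using hc, fun d hd => hcur d (List.mem_reverse.mp hd)⟩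
        · exact hacc u h
    · simp only [PySem.Chars.split₀.go, hs, Bool.false_eq_true, if_false] at hw
      refine ih (c :: cur) acc hacc ?_ w hw
      intro d hd
      rcases List.mem_cons.mp hd with h | h
      · subst h; simpa using hs
      · exact hcur d h

theorem pv_split₀_words (cs : List Char) : ∀ w ∈ PySem.Chars.split₀ cs, pvWord w :=
  pv_split₀_go_words cs [] [] (by simp) (by simp)

-- scanning a whitespace-free chunk just accumulates it
theorem pv_go_word (w rest : List Char) (cur : List Char) (acc : List (List Char))
    (hw : ∀ c ∈ w, PySem.Chars.isspace c = false) :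
    PySem.Chars.split₀.go (w ++ rest) cur acc = PySem.Chars.split₀.go rest (w.reverse ++ cur) acc := by
  induction w generalizing cur with
  | nil => simp
  | cons c w ih =>
    have hc : PySem.Chars.isspace c = false := hw c (by simp)
    simp only [List.cons_append, PySem.Chars.split₀.go, hc, Bool.false_eq_true, if_false]
    rw [ih _ (fun d hd => hw d (by simp [hd]))]
    simp

-- splitting the ' '-join of words gives the words back
theorem pv_go_join (ws : List (List Char)) (acc : List (List Char))
    (h : ∀ w ∈ ws, pvWord w) :
    PySem.Chars.split₀.go (PySem.Chars.join [' '] ws) [] acc = acc.reverse ++ ws := by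
  induction ws generalizing acc with
  | nil => simp [PySem.Chars.join_nil, PySem.Chars.split₀.go]
  | cons w tail ih =>
    have hw := h w (by simp)
    have hne : w.isEmpty = false := by simpa [List.isEmpty_iff] using hw.1
    cases tail with
    | nil =>
      rw [PySem.Chars.join_singleton]
      rw [show w = w ++ [] from (List.append_nil w).symm, pv_go_word w [] [] acc hw.2]
      simp only [List.append_nil, PySem.Chars.split₀.go]
      rw [if_neg (by simp [List.isEmpty_iff, hw.1])]
      simp
    | cons y ys =>
      rw [PySem.Chars.join_cons_cons]
      rw [List.append_assoc, pv_go_word w _ [] acc hw.2]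
      simp only [List.append_nil, List.singleton_append, PySem.Chars.split₀.go]
      rw [if_pos (by decide), if_neg (by simp [List.isEmpty_iff, hw.1])]
      rw [ih (w.reverse.reverse :: acc) (fun u hu => h u (by simp [hu]))]
      simp

theorem pv_split₀_join (ws : List (List Char)) (h : ∀ w ∈ ws, pvWord w) :
    PySem.Chars.split₀ (PySem.Chars.join [' '] ws) = ws := by
  unfold PySem.Chars.split₀
  rw [pv_go_join ws [] h]; simp

-- lower of the word-transforms
theorem pv_lower_lower (w : List Char) :
    PySem.Chars.lower (PySem.Chars.lower w) = PySem.Chars.lower w := by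
  simp [PySem.Chars.lower, Function.comp_def, pv_lowerChar_lowerChar]

theorem pv_lower_cap (w : List Char) :
    PySem.Chars.lower (PySem.Chars.upper (w.take 1) ++ PySem.Chars.lower w.tail) =
      PySem.Chars.lower w := by
  simp only [PySem.Chars.lower, PySem.Chars.upper, List.map_append, List.map_map,
    Function.comp_def, pv_lowerChar_upperChar, pv_lowerChar_lowerChar]
  rw [← List.map_append, ← List.drop_one, List.take_append_drop]

-- the transforms preserve word-ness
theorem pv_word_lower (w : List Char) (h : pvWord w) : pvWord (PySem.Chars.lower w) := by
  refine ⟨by simpa [PySem.Chars.lower] using h.1, ?_⟩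
  intro c hc
  simp only [PySem.Chars.lower, List.mem_map] at hc
  obtain ⟨d, hd, rfl⟩ := hc
  rw [pv_isspace_lowerChar]; exact h.2 d hd

theorem pv_word_cap (w : List Char) (h : pvWord w) :
    pvWord (PySem.Chars.upper (w.take 1) ++ PySem.Chars.lower w.tail) := by
  constructor
  · simp [PySem.Chars.upper, PySem.Chars.lower, List.take_eq_nil_iff, h.1]
  · intro c hc
    rcases List.mem_append.mp hc with hm | hm
    · simp only [PySem.Chars.upper, List.mem_map] at hm
      obtain ⟨d, hd, rfl⟩ := hm
      rw [pv_isspace_upperChar]; exact h.2 d (List.mem_of_mem_take hd)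
    · simp only [PySem.Chars.lower, List.mem_map] at hm
      obtain ⟨d, hd, rfl⟩ := hm
      rw [pv_isspace_lowerChar]; exact h.2 d (List.mem_of_mem_tail hd)

-- A's first-pass word transform, and B's fused transform, as functions
def pvG (iw : Int × List Char) : List Char :=
  let lw := PySem.Chars.lower iw.2
  if iw.1 == 0 || !(pvSmall.contains lw) then
    if !iw.2.isEmpty then
      PySem.Chars.upper (PySem.Chars.slice iw.2 none (some 1)) ++
        PySem.Chars.lower (PySem.Chars.slice iw.2 (some 1) none)
    else iw.2
  else lw

def pvF (w : List Char) : List Char :=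
  let lw := PySem.Chars.lower w
  if pvAcr.contains lw then pvAcr.getD lw [] else w

def pvB (iw : Int × List Char) : List Char :=
  let lw := PySem.Chars.lower iw.2
  if pvAcr.contains lw then pvAcr.getD lw []
  else if iw.1 == 0 || !(pvSmall.contains lw) then
    PySem.Chars.upper (PySem.Chars.slice iw.2 none (some 1)) ++
      PySem.Chars.lower (PySem.Chars.slice iw.2 (some 1) none)
  else lw

theorem pv_lower_G (iw : Int × List Char) :
    PySem.Chars.lower (pvG iw) = PySem.Chars.lower iw.2 := by
  by_cases h1 : iw.1 = 0 ∨ PySem.Chars.lower iw.2 ∉ pvSmall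
  · by_cases h2 : iw.2 = []
    · simp [pvG, h2, PySem.Chars.lower]
    · simp [pvG, h1, h2, PySem.List.slice_to, PySem.List.slice_from, pv_lower_cap]
  · simp [pvG, h1, pv_lower_lower]

theorem pv_word_G (iw : Int × List Char) (h : pvWord iw.2) : pvWord (pvG iw) := by
  have h2 : ¬ iw.2 = [] := h.1
  by_cases h1 : iw.1 = 0 ∨ PySem.Chars.lower iw.2 ∉ pvSmall
  · simpa [pvG, h1, h2, PySem.List.slice_to, PySem.List.slice_from] using pv_word_cap iw.2 h
  · simpa [pvG, h1, h2] using pv_word_lower iw.2 h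

theorem pv_F_G (iw : Int × List Char) (h : pvWord iw.2) : pvF (pvG iw) = pvB iw := by
  unfold pvF pvB
  simp only [pv_lower_G]
  by_cases hc : pvAcr.contains (PySem.Chars.lower iw.2) = true
  · simp [hc]
  · have h2 : ¬ iw.2 = [] := h.1
    by_cases h1 : iw.1 = 0 ∨ PySem.Chars.lower iw.2 ∉ pvSmall <;>
      simp [pvG, hc, h1, h2, PySem.List.slice_to, PySem.List.slice_from]

-- the two foldl bodies append one transformed word per step
theorem pv_bodyA1 :
    (fun (out : List (List Char)) (iw : Int × List Char) =>
      let lw := PySem.Chars.lower iw.2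
      if iw.1 == 0 || !(pvSmall.contains lw) then
        out ++ [if !iw.2.isEmpty then
                  PySem.Chars.upper (PySem.Chars.slice iw.2 none (some 1)) ++
                    PySem.Chars.lower (PySem.Chars.slice iw.2 (some 1) none)
                else iw.2]
      else out ++ [lw]) = fun out iw => out ++ [pvG iw] := by
  funext out iw
  simp only [pvG]
  split_ifs <;> rfl

theorem pv_bodyA2 :
    (fun (fixed : List (List Char)) (w : List Char) =>
      let lw := PySem.Chars.lower w
      if pvAcr.contains lw then fixed ++ [pvAcr.getD lw []] else fixed ++ [w]) =
    fun fixed w => fixed ++ [pvF w] := by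
  funext fixed w
  simp only [pvF]
  split_ifs <;> rfl

theorem pv_bodyB :
    (fun (ws : List (List Char)) (iw : Int × List Char) =>
      let lw := PySem.Chars.lower iw.2
      if pvAcr.contains lw then ws ++ [pvAcr.getD lw []]
      else if iw.1 == 0 || !(pvSmall.contains lw) then
        ws ++ [PySem.Chars.upper (PySem.Chars.slice iw.2 none (some 1)) ++
                 PySem.Chars.lower (PySem.Chars.slice iw.2 (some 1) none)]
      else ws ++ [lw]) = fun ws iw => ws ++ [pvB iw] := by
  funext ws iw
  simp only [pvB]
  split_ifs <;> rfl

theorem smart_title_role_py_eq_alt (s : String) :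
    smart_title_role_py s = smart_title_role_py_alt s := by
  unfold smart_title_role_py smart_title_role_py_alt pvTitleCase
  rw [pv_bodyA1, pv_bodyA2, pv_bodyB]
  simp only [PySem.List.foldl_append_singleton_eq_map, List.nil_append]
  have hwords : ∀ u ∈ (PySem.List.enumerate (PySem.Chars.split₀ s.toList) 0).map pvG, pvWord u := by
    intro u hu
    obtain ⟨iw, hiw, rfl⟩ := List.mem_map.mp hu
    refine pv_word_G iw (pv_split₀_words s.toList iw.2 ?_)
    obtain ⟨k, hk, rfl⟩ := (PySem.List.mem_enumerate_iff _ _ _).mp hiw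
    simp
  rw [pv_split₀_join _ hwords, List.map_map]
  congr 1
  congr 1
  refine List.map_congr_left ?_
  intro iw hiw
  refine pv_F_G iw (pv_split₀_words s.toList iw.2 ?_)
  obtain ⟨k, hk, rfl⟩ := (PySem.List.mem_enumerate_iff _ _ _).mp hiw
  simp

-- ===== VERDICT (by name: the statement is the Claim_ definition above) =====
theorem smart_title_role_py_spec : Claim_equal_smart_title_role_py := by
  intro s _
  exact smart_title_role_py_eq_alt s
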